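-- pv_equiv track=rewrite | github.com/Tchoow/nemo | connector/mainplus.py | maze_to_string
-- ===== SOURCE A (Python) =====
-- def maze_to_string(vwalls, hwalls, player_position, exit_position):
--     m = len(vwalls) + 1
--     n = len(hwalls[0]) + 1
--
--     maze = [["#" for _ in range(n * 2 + 1)] for _ in range(m * 2 + 1)]
--
--     for i in range(m):
--         for j in range(n):
--             maze[i * 2 + 1][j * 2 + 1] = " "
--
--     for i in range(len(vwalls)):
--         for j in range(len(vwalls[i])):
--             if vwalls[i][j] == 0:
--                 maze[i * 2 + 2][j * 2 + 1] = " "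
--
--     for i in range(len(hwalls)):
--         for j in range(len(hwalls[i])):
--             if hwalls[i][j] == 0:
--                 maze[i * 2 + 1][j * 2 + 2] = " "
--
--     # Ensure player and exit positions are within bounds
--     player_i, player_j = player_position
--     exit_i, exit_j = exit_position
--     maze[player_i][player_j] = "P"
--
--     # Remove the wall perimeter of the maze next to the exit
--     if exit_i == 0:
--         maze[0][exit_j] = " "
--         maze[1][exit_j] = "E"
--     elif exit_i == m * 2:
--         maze[m * 2][exit_j] = " "
--         maze[m * 2 - 1][exit_j] = "E"
--     elif exit_j == 0:
--         maze[exit_i][0] = " "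
--         maze[exit_i][1] = "E"
--     elif exit_j == n * 2:
--         maze[exit_i][n * 2] = " "
--         maze[exit_i][n * 2 - 1] = "E"
--     else:
--         maze[exit_i][exit_j] = "E"
--
--     return "\n".join("".join(row) for row in maze)
-- ===== SOURCE B (Python) =====
-- def maze_to_string(vwalls, hwalls, player_position, exit_position):
--     m = len(vwalls) + 1
--     n = len(hwalls[0]) + 1
--
--     def base(r, c):
--         # parity decides the kind of slot; no pre-allocated grid, no wall loops
--         if r % 2 == 1 and c % 2 == 1:
--             return " "
--         if r % 2 == 1 and c % 2 == 0:
--             if c > 0 and r // 2 < len(hwalls):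
--                 row = hwalls[r // 2]
--                 j = c // 2 - 1
--                 if j < len(row) and row[j] == 0:
--                     return " "
--             return "#"
--         if r % 2 == 0 and c % 2 == 1:
--             if 0 < r < 2 * m:
--                 row = vwalls[r // 2 - 1]
--                 j = c // 2
--                 if j < len(row) and row[j] == 0:
--                     return " "
--             return "#"
--         return "#"
--
--     lines = ["".join(base(r, c) for c in range(2 * n + 1)) for r in range(2 * m + 1)]
--
--     def put(r, c, ch):
--         row = list(lines[r])
--         row[c] = ch
--         lines[r] = "".join(row)
--
--     player_i, player_j = player_position
--     put(player_i, player_j, "P")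
--
--     exit_i, exit_j = exit_position
--     if exit_i == 0:
--         put(0, exit_j, " ")
--         put(1, exit_j, "E")
--     elif exit_i == m * 2:
--         put(m * 2, exit_j, " ")
--         put(m * 2 - 1, exit_j, "E")
--     elif exit_j == 0:
--         put(exit_i, 0, " ")
--         put(exit_i, 1, "E")
--     elif exit_j == n * 2:
--         put(exit_i, n * 2, " ")
--         put(exit_i, n * 2 - 1, "E")
--     else:
--         put(exit_i, exit_j, "E")
--
--     return "\n".join(lines)
-- ===== Notes on version B (the rewrite author's own statement) =====
-- stated objective: simpler
-- what changed: B computes each maze character directly from coordinate parity (cell/vertical-wall/horizontal-wall/post slot) and builds the lines in one pass, instead of allocating a mutable '#' grid and running three wall-carving mutation loops over it; the player/exit overrides are then applied to the affected lines only.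
import Mathlib
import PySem

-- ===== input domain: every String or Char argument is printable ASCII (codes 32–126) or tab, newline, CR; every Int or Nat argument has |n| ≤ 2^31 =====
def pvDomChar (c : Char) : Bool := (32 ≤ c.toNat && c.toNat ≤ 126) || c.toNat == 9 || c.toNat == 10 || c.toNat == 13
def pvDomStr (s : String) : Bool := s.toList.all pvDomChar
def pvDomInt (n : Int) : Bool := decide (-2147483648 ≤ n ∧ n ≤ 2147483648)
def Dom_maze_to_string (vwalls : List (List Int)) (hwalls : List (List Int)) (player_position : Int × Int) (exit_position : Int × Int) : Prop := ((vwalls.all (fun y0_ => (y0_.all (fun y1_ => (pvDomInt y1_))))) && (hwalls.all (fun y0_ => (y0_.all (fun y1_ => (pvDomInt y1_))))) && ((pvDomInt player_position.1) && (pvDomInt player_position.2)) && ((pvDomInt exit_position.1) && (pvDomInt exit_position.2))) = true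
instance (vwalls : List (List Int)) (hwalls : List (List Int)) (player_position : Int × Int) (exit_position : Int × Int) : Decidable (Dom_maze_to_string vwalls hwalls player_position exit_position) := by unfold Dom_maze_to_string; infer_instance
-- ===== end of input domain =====

-- B renders each maze line directly from coordinate parity instead of allocating and
-- mutating a full character grid; objective: simpler (no speed claim).

-- ===== PORT A =====
-- `maze[i][j] = ch` with Python index semantics (negative wraps); an out-of-range
-- write is a no-op here — Python raises IndexError there, excluded by Pre_.
def pvSet2 (g : List (List Char)) (i j : Int) (ch : Char) : List (List Char) :=
  PySem.List.pySetD g i (PySem.List.pySetD (PySem.List.pyGetD g i []) j ch)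

-- the cell loop: maze[i*2+1][j*2+1] = " "
def pvGridCells (m n : Nat) (g : List (List Char)) : List (List Char) :=
  (List.range m).foldl (fun g i =>
    (List.range n).foldl (fun g j => pvSet2 g ((2*i+1 : Nat) : Int) ((2*j+1 : Nat) : Int) ' ') g) g

-- the vwalls loop: if vwalls[i][j] == 0: maze[i*2+2][j*2+1] = " "
def pvGridV (vw : List (List Int)) (g : List (List Char)) : List (List Char) :=
  (List.range vw.length).foldl (fun g i =>
    (List.range (vw.getD i []).length).foldl (fun g j =>
      if (vw.getD i []).getD j 1 = 0 then pvSet2 g ((2*i+2 : Nat) : Int) ((2*j+1 : Nat) : Int) ' ' else g) g) g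

-- the hwalls loop: if hwalls[i][j] == 0: maze[i*2+1][j*2+2] = " "
def pvGridH (hw : List (List Int)) (g : List (List Char)) : List (List Char) :=
  (List.range hw.length).foldl (fun g i =>
    (List.range (hw.getD i []).length).foldl (fun g j =>
      if (hw.getD i []).getD j 1 = 0 then pvSet2 g ((2*i+1 : Nat) : Int) ((2*j+2 : Nat) : Int) ' ' else g) g) g

def maze_to_string (vwalls : List (List Int)) (hwalls : List (List Int)) (player_position : Int × Int) (exit_position : Int × Int) : String :=
  let m : Nat := vwalls.length + 1
  -- hwalls[0]: Python raises IndexError on hwalls = [] (excluded by Pre_)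
  let n : Nat := (PySem.List.pyGetD hwalls 0 []).length + 1
  let g0 : List (List Char) :=
    (List.range (m*2+1)).map (fun _ => (List.range (n*2+1)).map (fun _ => '#'))
  let g1 := pvGridCells m n g0
  let g2 := pvGridV vwalls g1
  let g3 := pvGridH hwalls g2
  let g4 := pvSet2 g3 player_position.1 player_position.2 'P'
  let g5 :=
    if exit_position.1 = 0 then
      pvSet2 (pvSet2 g4 0 exit_position.2 ' ') 1 exit_position.2 'E'
    else if exit_position.1 = ((m*2 : Nat) : Int) then
      pvSet2 (pvSet2 g4 ((m*2 : Nat) : Int) exit_position.2 ' ') (((m*2 : Nat) : Int) - 1) exit_position.2 'E'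
    else if exit_position.2 = 0 then
      pvSet2 (pvSet2 g4 exit_position.1 0 ' ') exit_position.1 1 'E'
    else if exit_position.2 = ((n*2 : Nat) : Int) then
      pvSet2 (pvSet2 g4 exit_position.1 ((n*2 : Nat) : Int) ' ') exit_position.1 (((n*2 : Nat) : Int) - 1) 'E'
    else
      pvSet2 g4 exit_position.1 exit_position.2 'E'
  String.intercalate "\n" (g5.map (fun row => String.ofList row))

-- ===== PORT B =====
-- the character at slot (r, c), read off the coordinate parity and the wall arrays
def pvBaseChar (vwalls hwalls : List (List Int)) (m : Nat) (r c : Nat) : Char :=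
  if r % 2 = 1 ∧ c % 2 = 1 then ' '
  else if r % 2 = 1 ∧ c % 2 = 0 then
    (if 0 < c ∧ r / 2 < hwalls.length then
      (if c / 2 - 1 < (hwalls.getD (r / 2) []).length ∧ (hwalls.getD (r / 2) []).getD (c / 2 - 1) 1 = 0
       then ' ' else '#')
     else '#')
  else if r % 2 = 0 ∧ c % 2 = 1 then
    (if 0 < r ∧ r < 2*m then
      (if c / 2 < (vwalls.getD (r / 2 - 1) []).length ∧ (vwalls.getD (r / 2 - 1) []).getD (c / 2) 1 = 0
       then ' ' else '#')
     else '#')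
  else '#'

-- put(r, c, ch): replace character c of line r, Python index semantics
-- (negative wraps; out-of-range — where Python raises — is a no-op)
def pvPut (lines : List String) (r c : Int) (ch : Char) : List String :=
  PySem.List.pySetD lines r
    (String.ofList (PySem.List.pySetD (PySem.List.pyGetD lines r "").toList c ch))

def maze_to_string_alt (vwalls : List (List Int)) (hwalls : List (List Int)) (player_position : Int × Int) (exit_position : Int × Int) : String :=
  let m : Nat := vwalls.length + 1
  let n : Nat := (PySem.List.pyGetD hwalls 0 []).length + 1
  let lines0 : List String :=
    (List.range (m*2+1)).map (fun r =>
      String.ofList ((List.range (n*2+1)).map (fun c => pvBaseChar vwalls hwalls m r c)))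
  let l1 := pvPut lines0 player_position.1 player_position.2 'P'
  let l2 :=
    if exit_position.1 = 0 then
      pvPut (pvPut l1 0 exit_position.2 ' ') 1 exit_position.2 'E'
    else if exit_position.1 = ((m*2 : Nat) : Int) then
      pvPut (pvPut l1 ((m*2 : Nat) : Int) exit_position.2 ' ') (((m*2 : Nat) : Int) - 1) exit_position.2 'E'
    else if exit_position.2 = 0 then
      pvPut (pvPut l1 exit_position.1 0 ' ') exit_position.1 1 'E'
    else if exit_position.2 = ((n*2 : Nat) : Int) then
      pvPut (pvPut l1 exit_position.1 ((n*2 : Nat) : Int) ' ') exit_position.1 (((n*2 : Nat) : Int) - 1) 'E'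
    else
      pvPut l1 exit_position.1 exit_position.2 'E'
  String.intercalate "\n" l2

-- ===== PRECONDITION & SPEC =====
-- Pre_ is exactly the set of inputs on which Python A returns: hwalls nonempty
-- (else hwalls[0] raises IndexError), no 0-entry of a wall row lying outside the
-- m×n maze shape (A writes out of the grid there: IndexError), and the player and
-- exit coordinates that A indexes with are within Python list-index range.
def Pre_maze_to_string (vwalls : List (List Int)) (hwalls : List (List Int)) (player_position : Int × Int) (exit_position : Int × Int) : Prop :=
  hwalls ≠ [] ∧
  (∀ row ∈ vwalls, ∀ x ∈ row.drop (hwalls.headI.length + 1), x ≠ 0) ∧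
  (∀ row ∈ hwalls.take (vwalls.length + 1), ∀ x ∈ row.drop (hwalls.headI.length + 1), x ≠ 0) ∧
  (∀ row ∈ hwalls.drop (vwalls.length + 1), ∀ x ∈ row, x ≠ 0) ∧
  PySem.Raise.InRange ((vwalls.length + 1) * 2 + 1) player_position.1 ∧
  PySem.Raise.InRange ((hwalls.headI.length + 1) * 2 + 1) player_position.2 ∧
  (if exit_position.1 = 0 ∨ exit_position.1 = ((vwalls.length + 1) * 2 : Nat) then
     PySem.Raise.InRange ((hwalls.headI.length + 1) * 2 + 1) exit_position.2
   else if exit_position.2 = 0 ∨ exit_position.2 = ((hwalls.headI.length + 1) * 2 : Nat) then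
     PySem.Raise.InRange ((vwalls.length + 1) * 2 + 1) exit_position.1
   else
     PySem.Raise.InRange ((vwalls.length + 1) * 2 + 1) exit_position.1 ∧
     PySem.Raise.InRange ((hwalls.headI.length + 1) * 2 + 1) exit_position.2)

instance (vwalls : List (List Int)) (hwalls : List (List Int)) (player_position : Int × Int) (exit_position : Int × Int) : Decidable (Pre_maze_to_string vwalls hwalls player_position exit_position) := by
  unfold Pre_maze_to_string; infer_instance

def pvWitness_maze_to_string : List (List Int) × List (List Int) × (Int × Int) × (Int × Int) :=
  ([[0, 1]], [[1], [0]], ((1 : Int), (1 : Int)), ((3 : Int), (3 : Int)))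

def Spec_maze_to_string (vwalls : List (List Int)) (hwalls : List (List Int)) (player_position : Int × Int) (exit_position : Int × Int) (out : String) : Prop := out = maze_to_string_alt vwalls hwalls player_position exit_position
instance (vwalls : List (List Int)) (hwalls : List (List Int)) (player_position : Int × Int) (exit_position : Int × Int) (out : String) : Decidable (Spec_maze_to_string vwalls hwalls player_position exit_position out) := by unfold Spec_maze_to_string; infer_instance

-- ===== CLAIM (what is proved, stated in full; the proofs are below) =====
def Claim_equal_maze_to_string : Prop := ∀ (vwalls : List (List Int)) (hwalls : List (List Int)) (player_position : Int × Int) (exit_position : Int × Int), Dom_maze_to_string vwalls hwalls player_position exit_position → Pre_maze_to_string vwalls hwalls player_position exit_position → Spec_maze_to_string vwalls hwalls player_position exit_position (maze_to_string vwalls hwalls player_position exit_position)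

-- ===== LEMMAS AND PROOFS =====

-- value of a grid slot (defaults never matter on in-range coordinates)
def pvGetN (g : List (List Char)) (r c : Nat) : Char := (g.getD r []).getD c '#'

-- shape invariant: R rows of C characters each
def pvShaped (R C : Nat) (g : List (List Char)) : Prop :=
  g.length = R ∧ ∀ row ∈ g, row.length = C

-- a list of (row, col) writes of ' ', applied left to right
def pvWrites (ws : List (Nat × Nat)) (g : List (List Char)) : List (List Char) :=
  ws.foldl (fun g w => pvSet2 g (w.1 : Int) (w.2 : Int) ' ') g

lemma pvSet2_natCast (g : List (List Char)) (i j : Nat) (ch : Char) :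
    pvSet2 g (i : Int) (j : Int) ch = g.set i ((g.getD i []).set j ch) := by
  simp [pvSet2, PySem.List.pySetD_natCast, PySem.List.pyGetD_natCast]

lemma pvShaped_set2 {R C : Nat} {g : List (List Char)} (h : pvShaped R C g)
    (i j : Nat) (ch : Char) : pvShaped R C (pvSet2 g (i : Int) (j : Int) ch) := by
  rw [pvSet2_natCast]
  by_cases hi : i < g.length
  · refine ⟨by simp [h.1], ?_⟩
    intro row hrow
    rcases List.mem_or_eq_of_mem_set hrow with h' | h'
    · exact h.2 row h'
    · subst h'
      rw [List.length_set]
      exact h.2 _ (by rw [List.getD_eq_getElem _ _ hi]; exact List.getElem_mem hi)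
  · rw [List.set_eq_of_length_le (Nat.le_of_not_lt hi)]
    exact h

lemma pvGetN_set2 {R C : Nat} {g : List (List Char)} (h : pvShaped R C g)
    {r c : Nat} (hr : r < R) (hc : c < C) (i j : Nat) (ch : Char) :
    pvGetN (pvSet2 g (i : Int) (j : Int) ch) r c
      = if i = r ∧ j = c then ch else pvGetN g r c := by
  have hgl : g.length = R := h.1
  rw [pvSet2_natCast]
  unfold pvGetN
  rw [List.getD_eq_getElem?_getD (l := g.set i ((g.getD i []).set j ch)), List.getElem?_set]
  by_cases hir : i = r
  · subst hir
    have hi : i < g.length := by omega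
    have hrowlen : (g.getD i []).length = C := by
      rw [List.getD_eq_getElem _ _ hi]; exact h.2 _ (List.getElem_mem hi)
    rw [if_pos rfl, if_pos hi, Option.getD_some]
    rw [List.getD_eq_getElem?_getD (l := (g.getD i []).set j ch), List.getElem?_set]
    by_cases hjc : j = c
    · subst hjc
      rw [if_pos rfl, if_pos (by omega), Option.getD_some]
      simp
    · rw [if_neg hjc]
      rw [← List.getD_eq_getElem?_getD]
      simp [hjc]
  · rw [if_neg hir]
    rw [← List.getD_eq_getElem?_getD]
    simp [hir]

lemma pvShaped_writes {R C : Nat} {g : List (List Char)} (h : pvShaped R C g)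
    (ws : List (Nat × Nat)) : pvShaped R C (pvWrites ws g) := by
  induction ws generalizing g with
  | nil => exact h
  | cons w ws ih => exact ih (pvShaped_set2 h w.1 w.2 ' ')

lemma pvGetN_writes {R C : Nat} {g : List (List Char)} (h : pvShaped R C g)
    {r c : Nat} (hr : r < R) (hc : c < C) (ws : List (Nat × Nat)) :
    pvGetN (pvWrites ws g) r c = if (r, c) ∈ ws then ' ' else pvGetN g r c := by
  induction ws generalizing g with
  | nil => simp [pvWrites]
  | cons w ws ih =>
    have h' := pvShaped_set2 h w.1 w.2 ' '
    have : pvWrites (w :: ws) g = pvWrites ws (pvSet2 g (w.1 : Int) (w.2 : Int) ' ') := rfl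
    rw [this, ih h', pvGetN_set2 h hr hc]
    by_cases hmem : (r, c) ∈ ws
    · simp [hmem]
    · by_cases hw : w = (r, c)
      · subst hw; simp [hmem]
      · have hne : ¬ (w.1 = r ∧ w.2 = c) := by
          intro ⟨h1, h2⟩; exact hw (Prod.ext h1 h2)
        have hne2 : ¬ (r, c) = w := fun h => hw h.symm
        simp [hmem, hne, hne2]

-- write lists of the three init loops
def pvWs1 (m n : Nat) : List (Nat × Nat) :=
  (List.range m).flatMap (fun i => (List.range n).map (fun j => (2*i+1, 2*j+1)))

def pvWs2 (vw : List (List Int)) : List (Nat × Nat) :=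
  (List.range vw.length).flatMap (fun i =>
    (List.range (vw.getD i []).length).filterMap (fun j =>
      if (vw.getD i []).getD j 1 = 0 then some (2*i+2, 2*j+1) else none))

def pvWs3 (hw : List (List Int)) : List (Nat × Nat) :=
  (List.range hw.length).flatMap (fun i =>
    (List.range (hw.getD i []).length).filterMap (fun j =>
      if (hw.getD i []).getD j 1 = 0 then some (2*i+1, 2*j+2) else none))

lemma pvGridCells_eq (m n : Nat) (g : List (List Char)) :
    pvGridCells m n g = pvWrites (pvWs1 m n) g := by
  simp only [pvGridCells, pvWrites, pvWs1, List.foldl_flatMap, List.foldl_map]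

lemma pvGridV_eq (vw : List (List Int)) (g : List (List Char)) :
    pvGridV vw g = pvWrites (pvWs2 vw) g := by
  simp only [pvGridV, pvWrites, pvWs2, List.foldl_flatMap, List.foldl_filterMap]
  congr 1
  funext g i
  congr 1
  funext g j
  split_ifs <;> rfl

lemma pvGridH_eq (hw : List (List Int)) (g : List (List Char)) :
    pvGridH hw g = pvWrites (pvWs3 hw) g := by
  simp only [pvGridH, pvWrites, pvWs3, List.foldl_flatMap, List.foldl_filterMap]
  congr 1
  funext g i
  congr 1
  funext g j
  split_ifs <;> rfl

lemma pvMem_ws1 {m n r c : Nat} :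
    ((r, c) ∈ pvWs1 m n) ↔ ∃ i, i < m ∧ ∃ j, j < n ∧ 2*i+1 = r ∧ 2*j+1 = c := by
  simp [pvWs1, Prod.ext_iff]

lemma pvMem_ws2 {vw : List (List Int)} {r c : Nat} :
    ((r, c) ∈ pvWs2 vw) ↔ ∃ i, i < vw.length ∧ ∃ j, j < (vw.getD i []).length ∧
      (vw.getD i []).getD j 1 = 0 ∧ 2*i+2 = r ∧ 2*j+1 = c := by
  simp [pvWs2, Option.ite_none_right_eq_some, Prod.ext_iff]

lemma pvMem_ws3 {hw : List (List Int)} {r c : Nat} :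
    ((r, c) ∈ pvWs3 hw) ↔ ∃ i, i < hw.length ∧ ∃ j, j < (hw.getD i []).length ∧
      (hw.getD i []).getD j 1 = 0 ∧ 2*i+1 = r ∧ 2*j+2 = c := by
  simp [pvWs3, Option.ite_none_right_eq_some, Prod.ext_iff]

lemma pvShaped_g0 (m n : Nat) :
    pvShaped (m*2+1) (n*2+1)
      ((List.range (m*2+1)).map (fun _ => (List.range (n*2+1)).map (fun _ => '#'))) := by
  constructor
  · simp
  · intro row hrow
    simp only [List.mem_map] at hrow
    obtain ⟨a, _, ha⟩ := hrow
    simp [← ha]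

lemma pvGetN_g0 (m n r c : Nat) :
    pvGetN ((List.range (m*2+1)).map (fun _ => (List.range (n*2+1)).map (fun _ => '#'))) r c = '#' := by
  unfold pvGetN
  rcases lt_or_ge r (m*2+1) with hr | hr
  · have h1 : (((List.range (m*2+1)).map (fun _ => (List.range (n*2+1)).map (fun _ => '#'))).getD r [])
        = (List.range (n*2+1)).map (fun _ => '#') := by
      rw [List.getD_eq_getElem _ _ (by simpa using hr)]
      exact List.getElem_map _
    rw [h1]
    rcases lt_or_ge c (n*2+1) with hc | hc
    · rw [List.getD_eq_getElem _ _ (by simpa using hc)]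
      simp
    · rw [List.getD_eq_getElem?_getD, List.getElem?_eq_none (by simpa using hc)]
      rfl
  · have h1 : (((List.range (m*2+1)).map (fun _ => (List.range (n*2+1)).map (fun _ => '#'))).getD r [])
        = [] := by
      rw [List.getD_eq_getElem?_getD, List.getElem?_eq_none (by simpa using hr)]
      rfl
    rw [h1]
    rfl

lemma pvGetN_eq_getElem {g : List (List Char)} {r c : Nat} (h1 : r < g.length)
    (h2 : c < (g[r]'h1).length) : pvGetN g r c = (g[r]'h1)[c]'h2 := by
  unfold pvGetN
  rw [List.getD_eq_getElem _ _ h1, List.getD_eq_getElem _ _ h2]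

-- pointwise value of the grid after the three loops = B's parity formula
lemma pvGrid_pointwise (vw hw : List (List Int)) (m n : Nat) (hm : m = vw.length + 1)
    {r c : Nat} (hr : r < m*2+1) (hc : c < n*2+1) :
    pvGetN (pvGridH hw (pvGridV vw (pvGridCells m n
        ((List.range (m*2+1)).map (fun _ => (List.range (n*2+1)).map (fun _ => '#')))))) r c
      = pvBaseChar vw hw m r c := by
  have h0 := pvShaped_g0 m n
  rw [pvGridCells_eq, pvGridV_eq, pvGridH_eq]
  have h1 := pvShaped_writes h0 (pvWs1 m n)
  have h2 := pvShaped_writes h1 (pvWs2 vw)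
  rw [pvGetN_writes h2 hr hc, pvGetN_writes h1 hr hc, pvGetN_writes h0 hr hc, pvGetN_g0]
  rcases Nat.mod_two_eq_zero_or_one r with hro | hro <;>
    rcases Nat.mod_two_eq_zero_or_one c with hco | hco
  · -- r even, c even: everything stays '#'
    have m3 : ¬ (r, c) ∈ pvWs3 hw := by
      rw [pvMem_ws3]; rintro ⟨i, hi, j, hj, hv, hrr, hcc⟩; omega
    have m2 : ¬ (r, c) ∈ pvWs2 vw := by
      rw [pvMem_ws2]; rintro ⟨i, hi, j, hj, hv, hrr, hcc⟩; omega
    have m1 : ¬ (r, c) ∈ pvWs1 m n := by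
      rw [pvMem_ws1]; rintro ⟨i, hi, j, hj, hrr, hcc⟩; omega
    rw [if_neg m3, if_neg m2, if_neg m1]
    unfold pvBaseChar
    rw [if_neg (by omega : ¬ (r % 2 = 1 ∧ c % 2 = 1)),
        if_neg (by omega : ¬ (r % 2 = 1 ∧ c % 2 = 0)),
        if_neg (by omega : ¬ (r % 2 = 0 ∧ c % 2 = 1))]
  · -- r even, c odd: vertical wall slot
    have m3 : ¬ (r, c) ∈ pvWs3 hw := by
      rw [pvMem_ws3]; rintro ⟨i, hi, j, hj, hv, hrr, hcc⟩; omega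
    have m1 : ¬ (r, c) ∈ pvWs1 m n := by
      rw [pvMem_ws1]; rintro ⟨i, hi, j, hj, hrr, hcc⟩; omega
    rw [if_neg m3]
    by_cases hA : 0 < r ∧ r < 2*m
    · by_cases hX : c/2 < (vw.getD (r/2-1) []).length ∧ (vw.getD (r/2-1) []).getD (c/2) 1 = 0
      · have m2 : (r, c) ∈ pvWs2 vw := by
          rw [pvMem_ws2]
          exact ⟨r/2-1, by omega, c/2, hX.1, hX.2, by omega, by omega⟩
        rw [if_pos m2]
        unfold pvBaseChar
        rw [if_neg (by omega : ¬ (r % 2 = 1 ∧ c % 2 = 1)),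
            if_neg (by omega : ¬ (r % 2 = 1 ∧ c % 2 = 0)),
            if_pos (⟨hro, hco⟩ : r % 2 = 0 ∧ c % 2 = 1), if_pos hA, if_pos hX]
      · have m2 : ¬ (r, c) ∈ pvWs2 vw := by
          rw [pvMem_ws2]; rintro ⟨i, hi, j, hj, hv, hrr, hcc⟩
          have hi' : i = r/2-1 := by omega
          have hj' : j = c/2 := by omega
          subst hi'; subst hj'
          exact hX ⟨hj, hv⟩
        rw [if_neg m2, if_neg m1]
        unfold pvBaseChar
        rw [if_neg (by omega : ¬ (r % 2 = 1 ∧ c % 2 = 1)),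
            if_neg (by omega : ¬ (r % 2 = 1 ∧ c % 2 = 0)),
            if_pos (⟨hro, hco⟩ : r % 2 = 0 ∧ c % 2 = 1), if_pos hA, if_neg hX]
    · have m2 : ¬ (r, c) ∈ pvWs2 vw := by
        rw [pvMem_ws2]; rintro ⟨i, hi, j, hj, hv, hrr, hcc⟩; omega
      rw [if_neg m2, if_neg m1]
      unfold pvBaseChar
      rw [if_neg (by omega : ¬ (r % 2 = 1 ∧ c % 2 = 1)),
          if_neg (by omega : ¬ (r % 2 = 1 ∧ c % 2 = 0)),
          if_pos (⟨hro, hco⟩ : r % 2 = 0 ∧ c % 2 = 1), if_neg hA]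
  · -- r odd, c even: horizontal wall slot
    have m2 : ¬ (r, c) ∈ pvWs2 vw := by
      rw [pvMem_ws2]; rintro ⟨i, hi, j, hj, hv, hrr, hcc⟩; omega
    have m1 : ¬ (r, c) ∈ pvWs1 m n := by
      rw [pvMem_ws1]; rintro ⟨i, hi, j, hj, hrr, hcc⟩; omega
    by_cases hA : 0 < c ∧ r/2 < hw.length
    · by_cases hX : c/2-1 < (hw.getD (r/2) []).length ∧ (hw.getD (r/2) []).getD (c/2-1) 1 = 0
      · have m3 : (r, c) ∈ pvWs3 hw := by
          rw [pvMem_ws3]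
          exact ⟨r/2, hA.2, c/2-1, hX.1, hX.2, by omega, by omega⟩
        rw [if_pos m3]
        unfold pvBaseChar
        rw [if_neg (by omega : ¬ (r % 2 = 1 ∧ c % 2 = 1)),
            if_pos (⟨hro, hco⟩ : r % 2 = 1 ∧ c % 2 = 0), if_pos hA, if_pos hX]
      · have m3 : ¬ (r, c) ∈ pvWs3 hw := by
          rw [pvMem_ws3]; rintro ⟨i, hi, j, hj, hv, hrr, hcc⟩
          have hi' : i = r/2 := by omega
          have hj' : j = c/2-1 := by omega
          subst hi'; subst hj'
          exact hX ⟨hj, hv⟩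
        rw [if_neg m3, if_neg m2, if_neg m1]
        unfold pvBaseChar
        rw [if_neg (by omega : ¬ (r % 2 = 1 ∧ c % 2 = 1)),
            if_pos (⟨hro, hco⟩ : r % 2 = 1 ∧ c % 2 = 0), if_pos hA, if_neg hX]
    · have m3 : ¬ (r, c) ∈ pvWs3 hw := by
        rw [pvMem_ws3]; rintro ⟨i, hi, j, hj, hv, hrr, hcc⟩
        exact hA ⟨by omega, by omega⟩
      rw [if_neg m3, if_neg m2, if_neg m1]
      unfold pvBaseChar
      rw [if_neg (by omega : ¬ (r % 2 = 1 ∧ c % 2 = 1)),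
          if_pos (⟨hro, hco⟩ : r % 2 = 1 ∧ c % 2 = 0), if_neg hA]
  · -- r odd, c odd: a cell
    have m1 : (r, c) ∈ pvWs1 m n := by
      rw [pvMem_ws1]
      exact ⟨r/2, by omega, c/2, by omega, by omega, by omega⟩
    have base : pvBaseChar vw hw m r c = ' ' := by
      unfold pvBaseChar
      rw [if_pos (⟨hro, hco⟩ : r % 2 = 1 ∧ c % 2 = 1)]
    rw [base]
    by_cases m3 : (r, c) ∈ pvWs3 hw
    · rw [if_pos m3]
    · rw [if_neg m3]
      by_cases m2 : (r, c) ∈ pvWs2 vw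
      · rw [if_pos m2]
      · rw [if_neg m2, if_pos m1]

lemma pvGrid_eq (vw hw : List (List Int)) (m n : Nat) (hm : m = vw.length + 1) :
    pvGridH hw (pvGridV vw (pvGridCells m n
        ((List.range (m*2+1)).map (fun _ => (List.range (n*2+1)).map (fun _ => '#')))))
      = (List.range (m*2+1)).map (fun r => (List.range (n*2+1)).map (fun c => pvBaseChar vw hw m r c)) := by
  have h0 := pvShaped_g0 m n
  have hsh : pvShaped (m*2+1) (n*2+1)
      (pvGridH hw (pvGridV vw (pvGridCells m n
        ((List.range (m*2+1)).map (fun _ => (List.range (n*2+1)).map (fun _ => '#')))))) := by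
    rw [pvGridCells_eq, pvGridV_eq, pvGridH_eq]
    exact pvShaped_writes (pvShaped_writes (pvShaped_writes h0 _) _) _
  apply List.ext_getElem
  · rw [hsh.1]; simp
  · intro r h1 h2
    have hr : r < m*2+1 := by rw [hsh.1] at h1; exact h1
    apply List.ext_getElem
    · rw [hsh.2 _ (List.getElem_mem h1)]
      simp [List.getElem_map]
    · intro c hc1 hc2
      have hc : c < n*2+1 := by rw [hsh.2 _ (List.getElem_mem h1)] at hc1; exact hc1
      rw [← pvGetN_eq_getElem h1 hc1]
      rw [pvGrid_pointwise vw hw m n hm hr hc]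
      simp [List.getElem_map]

-- pvPut is pvSet2 seen through String.ofList
lemma pvPyIdx?_lt {n : Nat} {i : Int} {k : Nat} (h : PySem.List.pyIdx? n i = some k) : k < n := by
  unfold PySem.List.pyIdx? at h
  split_ifs at h with h1 h2 h3 <;> simp_all <;> omega

lemma pvPut_map_ofList (g : List (List Char)) (i j : Int) (ch : Char) :
    pvPut (g.map String.ofList) i j ch = (pvSet2 g i j ch).map String.ofList := by
  unfold pvPut pvSet2 PySem.List.pySetD PySem.List.pySet? PySem.List.pyGetD PySem.List.pyGet?
  rw [List.length_map]
  cases h : PySem.List.pyIdx? g.length i with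
  | none => simp
  | some k =>
    have hk : k < g.length := pvPyIdx?_lt h
    simp only [Option.getD_some, Option.map, Option.bind]
    rw [List.getElem?_map, List.getElem?_eq_getElem hk]
    simp only [Option.map_some, Option.getD_some, String.toList_ofList]
    rw [List.map_set]

theorem maze_to_string_eq_alt (vwalls hwalls : List (List Int))
    (player_position exit_position : Int × Int) :
    maze_to_string vwalls hwalls player_position exit_position
      = maze_to_string_alt vwalls hwalls player_position exit_position := by
  simp only [maze_to_string, maze_to_string_alt]
  rw [show ((List.range ((vwalls.length+1)*2+1)).map (fun r =>
        String.ofList ((List.range (((PySem.List.pyGetD hwalls 0 []).length+1)*2+1)).map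
          (fun c => pvBaseChar vwalls hwalls (vwalls.length+1) r c))))
      = (pvGridH hwalls (pvGridV vwalls (pvGridCells (vwalls.length+1)
          ((PySem.List.pyGetD hwalls 0 []).length+1)
          ((List.range ((vwalls.length+1)*2+1)).map (fun _ =>
            (List.range (((PySem.List.pyGetD hwalls 0 []).length+1)*2+1)).map
              (fun _ => '#')))))).map String.ofList from by
    rw [pvGrid_eq vwalls hwalls (vwalls.length+1) ((PySem.List.pyGetD hwalls 0 []).length+1) rfl]
    rw [List.map_map]
    rfl]
  simp only [pvPut_map_ofList, apply_ite (List.map String.ofList)]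

-- ===== VERDICT (by name: the statement is the Claim_ definition above) =====
theorem maze_to_string_spec : Claim_equal_maze_to_string := by
  intro vw hw pp ee _ _
  unfold Spec_maze_to_string
  exact maze_to_string_eq_alt vw hw pp ee
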